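-- pv_equiv track=rewrite | github.com/jeremiah-c-leary/vhdl-style-guide | vsg/tokens.py | filter_character_literal_candidates
-- ===== SOURCE A (Python) =====
-- def filter_character_literal_candidates(lCandidates):
--     lReturn = []
--     lSequentialCandidates = []
--     for iIndex, lCandidate in enumerate(lCandidates):
--         # The algorithm is a bit more complex than one might expect because it needs to be able to handle sequences of
--         # character literals separated by a single character, e.g. `'1','0','a'`, as well as character literals inside
--         # qualified expressions, e.g. std_logic'('1'), both of which include "red herring" candidates.
--         # First, build up a sequence of sequential candidates, i.e. candidates that are separated by one character. Most
--         # of the time, this sequence will be one long.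
--         lSequentialCandidates.append(lCandidate)
--
--         bCandidateIsLast = iIndex == len(lCandidates) - 1
--         if bCandidateIsLast:
--             bCandidateIsLastInSequence = True
--         else:
--             lNextLiteral = lCandidates[iIndex + 1]
--             bCandidateIsLastInSequence = lCandidate[1] != lNextLiteral[0]
--
--         if bCandidateIsLastInSequence:
--             # At the end of a sequence, filter the candidates to find the character literals. Sequential candidates will
--             # alternate between valid and invalid candidates. For example, in `'1','0'`, the first candidate ('1') is
--             # valid, the second (',') is invalid, and the third ('0') is valid. The first in the sequence will always be
--             # valid unless a qualified expression is present. For example, in `std_logic'('1')`, the first candidate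
--             # ('(') is invalid and the second candidate ('1') is valid. If there is a qualified expression, the number
--             # of candidates will be even; otherwise the number will be odd.
--             # Therefore, filter by selecting every second candidate, starting with 0 if the number of candidates is odd
--             # and starting with 1 if the number of candidates is even.
--             iSequenceStart = (len(lSequentialCandidates) + 1) % 2
--             lFilteredLiterals = [lSequentialCandidates[x] for x in range(iSequenceStart, len(lSequentialCandidates), 2)]
--             lReturn.extend(lFilteredLiterals)
--
--             # Clear the sequential candidates for the next sequence.
--             lSequentialCandidates = []
--
--     return lReturn
-- ===== SOURCE B (Python) =====
-- def filter_character_literal_candidates(lCandidates):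
--     # Single backward pass: the last element of each chained run is always kept,
--     # and within a run every other element (counted from the run's end) is kept.
--     lOut = []
--     bKeep = True
--     for iIndex in range(len(lCandidates) - 1, -1, -1):
--         lCandidate = lCandidates[iIndex]
--         if bKeep:
--             lOut.append(lCandidate)
--         if iIndex > 0 and lCandidates[iIndex - 1][1] == lCandidate[0]:
--             bKeep = not bKeep
--         else:
--             bKeep = True
--     lOut.reverse()
--     return lOut
-- ===== Notes on version B (the rewrite author's own statement) =====
-- stated objective: simpler
-- what changed: Replaces the forward pass that buffers each run of chained candidates and then index-selects every second buffered element with a single backward pass that keeps a one-bit keep/skip flag (reset at run boundaries) and no run buffer.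
import Mathlib
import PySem

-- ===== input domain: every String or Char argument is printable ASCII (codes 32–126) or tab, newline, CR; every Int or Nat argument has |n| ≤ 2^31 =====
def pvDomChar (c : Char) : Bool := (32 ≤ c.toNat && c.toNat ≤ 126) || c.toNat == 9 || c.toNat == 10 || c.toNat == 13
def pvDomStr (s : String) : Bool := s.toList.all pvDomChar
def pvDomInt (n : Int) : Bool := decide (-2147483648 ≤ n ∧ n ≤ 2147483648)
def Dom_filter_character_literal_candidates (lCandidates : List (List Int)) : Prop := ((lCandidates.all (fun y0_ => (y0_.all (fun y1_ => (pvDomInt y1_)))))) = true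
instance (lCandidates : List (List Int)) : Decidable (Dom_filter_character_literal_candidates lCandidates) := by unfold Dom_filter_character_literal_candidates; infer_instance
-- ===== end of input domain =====

-- B replaces A's forward pass with a run buffer + index selection by a single backward
-- pass with a one-bit keep/skip flag (objective: simpler; same O(n) cost).

-- ===== PORT A =====
-- the body of A's `for iIndex, lCandidate in enumerate(lCandidates)` loop
def fclcStep (lCandidates : List (List Int)) (st : List (List Int) × List (List Int))
    (p : Int × List Int) : List (List Int) × List (List Int) :=
  let lReturn := st.1
  let lSequentialCandidates := st.2 ++ [p.2]
  let bCandidateIsLast := p.1 == (lCandidates.length : Int) - 1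
  let bCandidateIsLastInSequence :=
    if bCandidateIsLast then true
    else
      let lNextLiteral := PySem.List.pyGetD lCandidates (p.1 + 1) []
      PySem.List.pyGetD p.2 1 0 != PySem.List.pyGetD lNextLiteral 0 0
  if bCandidateIsLastInSequence then
    let iSequenceStart := PySem.Int.mod ((lSequentialCandidates.length : Int) + 1) 2
    let lFilteredLiterals :=
      (PySem.List.pyRange iSequenceStart (lSequentialCandidates.length : Int) 2).map
        (fun x => PySem.List.pyGetD lSequentialCandidates x [])
    (lReturn ++ lFilteredLiterals, [])
  else
    (lReturn, lSequentialCandidates)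

def filter_character_literal_candidates (lCandidates : List (List Int)) : List (List Int) :=
  ((PySem.List.enumerate lCandidates).foldl (fclcStep lCandidates) ([], [])).1

-- ===== PORT B =====
-- `for iIndex in range(len(lCandidates) - 1, -1, -1)`: i+1 is the loop counter, iIndex = i
def fclcAltGo (xs : List (List Int)) : Nat → Bool → List (List Int) → List (List Int)
  | 0, _, lOut => lOut
  | i + 1, bKeep, lOut =>
    let lCandidate := PySem.List.pyGetD xs (i : Int) []
    let lOut' := if bKeep then lOut ++ [lCandidate] else lOut
    let bKeep' :=
      if decide (0 < i) &&
          (PySem.List.pyGetD (PySem.List.pyGetD xs ((i : Int) - 1) []) 1 0 ==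
            PySem.List.pyGetD lCandidate 0 0) then
        !bKeep
      else
        true
    fclcAltGo xs i bKeep' lOut'

def filter_character_literal_candidates_alt (lCandidates : List (List Int)) : List (List Int) :=
  (fclcAltGo lCandidates lCandidates.length true []).reverse

-- ===== PRECONDITION & SPEC =====
-- Pre_ excludes exactly the inputs where Python A raises IndexError: both programs read
-- element [1] of every non-last candidate and element [0] of every non-first candidate.
def Pre_filter_character_literal_candidates (lCandidates : List (List Int)) : Prop :=
  ∀ p ∈ lCandidates.zip lCandidates.tail, 2 ≤ p.1.length ∧ 1 ≤ p.2.length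

instance (lCandidates : List (List Int)) : Decidable (Pre_filter_character_literal_candidates lCandidates) := by
  unfold Pre_filter_character_literal_candidates; infer_instance

def pvWitness_filter_character_literal_candidates : List (List Int) := [[1, 2], [2, 3], [3, 4]]

def Spec_filter_character_literal_candidates (lCandidates : List (List Int)) (out : List (List Int)) : Prop := out = filter_character_literal_candidates_alt lCandidates
instance (lCandidates : List (List Int)) (out : List (List Int)) : Decidable (Spec_filter_character_literal_candidates lCandidates out) := by unfold Spec_filter_character_literal_candidates; infer_instance

-- ===== CLAIM (what is proved, stated in full; the proofs are below) =====
def Claim_equal_filter_character_literal_candidates : Prop := ∀ (lCandidates : List (List Int)), Dom_filter_character_literal_candidates lCandidates → Pre_filter_character_literal_candidates lCandidates → Spec_filter_character_literal_candidates lCandidates (filter_character_literal_candidates lCandidates)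

-- ===== LEMMAS AND PROOFS =====

-- `lCandidate[1] == lNext[0]`: two consecutive candidates are chained
def pvCh (c d : List Int) : Bool := PySem.List.pyGetD c 1 0 == PySem.List.pyGetD d 0 0

-- A's per-sequence selection `[seq[x] for x in range((len(seq)+1) % 2, len(seq), 2)]`
def pvSel (s : List (List Int)) : List (List Int) :=
  (PySem.List.pyRange (PySem.Int.mod ((s.length : Int) + 1) 2) (s.length : Int) 2).map
    (fun x => PySem.List.pyGetD s x [])

-- structural restatement of A's loop: accumulate the current run, flush at boundaries
def pvProc : List (List Int) → List (List Int) → List (List Int)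
  | _, [] => []
  | seq, c :: ys =>
    if (match ys with | [] => true | d :: _ => !(pvCh c d)) then
      pvSel (seq ++ [c]) ++ pvProc [] ys
    else
      pvProc (seq ++ [c]) ys

-- pure alternation: keep every other element starting with the head iff k
def pvAlt2 : List (List Int) → Bool → List (List Int)
  | [], _ => []
  | c :: t, k => (if k then [c] else []) ++ pvAlt2 t (!k)

-- structural restatement of B's backward loop, acting on the reversed input
def pvHrev : List (List Int) → Bool → List (List Int)
  | [], _ => []
  | c :: rest, k =>
    (if k then [c] else []) ++
      pvHrev rest (match rest with | [] => true | d :: _ => if pvCh d c then !k else true)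

-- every other element, from the front
def pvEo : List (List Int) → List (List Int)
  | [] => []
  | [a] => [a]
  | a :: _ :: t => a :: pvEo t

-- maximal runs of chained candidates
def pvRuns : List (List Int) → List (List (List Int))
  | [] => []
  | [c] => [[c]]
  | c :: d :: t =>
    match pvRuns (d :: t) with
    | [] => [[c]]
    | r :: rs => if pvCh c d then (c :: r) :: rs else [c] :: r :: rs

def pvBnd (r r' : List (List Int)) : Prop :=
  ∀ a b, r.getLast? = some a → r'.head? = some b → pvCh a b = false

-- ---- A side ----

theorem pvA1 (xs : List (List Int)) :
    ∀ (ys : List (List Int)) (i : Nat), xs.drop i = ys →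
      ∀ ret seq,
        ((PySem.List.enumerate ys (i : Int)).foldl (fclcStep xs) (ret, seq)).1 =
          ret ++ pvProc seq ys := by
  intro ys
  induction ys with
  | nil => intro i h ret seq; simp [PySem.List.enumerate_nil, pvProc]
  | cons c ys' ih =>
    intro i h ret seq
    have hlen : xs.length - i = ys'.length + 1 := by
      have := congrArg List.length h
      simpa using this
    have hi : i < xs.length := by omega
    rw [PySem.List.enumerate_cons]
    simp only [List.foldl_cons]
    have hd1 : xs.drop (i + 1) = ys' := by
      have := List.drop_drop (i := 1) (j := i) (l := xs)
      rw [h] at this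
      simpa using this.symm
    cases ys' with
    | nil =>
      have hlen0 : xs.length = i + 1 := by
        simp at hlen
        omega
      have hlast : ((i : Int) == (xs.length : Int) - 1) = true := by
        simp only [beq_iff_eq]
        omega
      have hstep : fclcStep xs (ret, seq) ((i : Int), c) =
          (ret ++ pvSel (seq ++ [c]), []) := by
        simp [fclcStep, hlast, pvSel]
      rw [hstep, PySem.List.enumerate_nil]
      simp [pvProc]
    | cons d t =>
      have hlast : ((i : Int) == (xs.length : Int) - 1) = false := by
        simp only [beq_eq_false_iff_ne, ne_eq]
        have := congrArg List.length hd1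
        simp at this
        omega
      have hnext : PySem.List.pyGetD xs ((i : Int) + 1) [] = d := by
        have hcast : ((i : Int) + 1) = ((i + 1 : Nat) : Int) := by push_cast; ring
        rw [hcast, PySem.List.pyGetD_natCast]
        have : xs[i+1]? = some d := by
          rw [← List.head?_drop, hd1]; rfl
        simp [List.getD_eq_getElem?_getD, this]
      have hproc : pvProc seq (c :: d :: t) =
          if (!pvCh c d) = true then pvSel (seq ++ [c]) ++ pvProc [] (d :: t)
          else pvProc (seq ++ [c]) (d :: t) := rfl
      cases hc : pvCh c d
      · have hstep : fclcStep xs (ret, seq) ((i : Int), c) =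
            (ret ++ pvSel (seq ++ [c]), []) := by
          simp [fclcStep, hlast, hnext, pvSel, pvCh] at hc ⊢
          simp [hc]
        rw [hstep, show ((i : Int) + 1) = ((i + 1 : Nat) : Int) by push_cast; ring,
          ih (i+1) hd1]
        rw [hproc, hc]
        simp
      · have hstep : fclcStep xs (ret, seq) ((i : Int), c) =
            (ret, seq ++ [c]) := by
          simp [fclcStep, hlast, hnext, pvCh] at hc ⊢
          simp [hc]
        rw [hstep, show ((i : Int) + 1) = ((i + 1 : Nat) : Int) by push_cast; ring,
          ih (i+1) hd1]
        rw [hproc, hc]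
        simp

theorem pvA_eq (xs : List (List Int)) :
    filter_character_literal_candidates xs = pvProc [] xs := by
  have h := pvA1 xs xs 0 (by simp) [] []
  unfold filter_character_literal_candidates
  simpa using h

theorem pvRuns_shape : ∀ (t : List (List Int)) (c : List Int),
    ∃ s ss, pvRuns (c :: t) = (c :: s) :: ss := by
  intro t
  induction t with
  | nil => exact fun c => ⟨[], [], rfl⟩
  | cons d t ih =>
    intro c
    rcases ih d with ⟨s, ss, h⟩
    cases hc : pvCh c d
    · exact ⟨[], (d :: s) :: ss, by simp [pvRuns, h, hc]⟩
    · exact ⟨d :: s, ss, by simp [pvRuns, h, hc]⟩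

theorem pvPA : ∀ (ys : List (List Int)) (seq : List (List Int)),
    pvProc seq ys =
      match pvRuns ys with
      | [] => []
      | r :: rs => pvSel (seq ++ r) ++ (rs.map pvSel).flatten := by
  intro ys
  induction ys with
  | nil => intro seq; simp [pvProc, pvRuns]
  | cons c ys ih =>
    intro seq
    cases ys with
    | nil => simp [pvProc, pvRuns]
    | cons d t =>
      rcases pvRuns_shape t d with ⟨s, ss, h⟩
      have hstep : pvProc seq (c :: d :: t) =
          if (!pvCh c d) = true then pvSel (seq ++ [c]) ++ pvProc [] (d :: t)
          else pvProc (seq ++ [c]) (d :: t) := rfl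
      cases hc : pvCh c d
      · rw [hstep, hc]
        simp only [Bool.not_false, if_pos]
        rw [ih []]
        simp [pvRuns, h, hc]
      · rw [hstep, hc]
        simp only [Bool.not_true, Bool.false_eq_true, if_neg, not_false_eq_true]
        rw [ih (seq ++ [c])]
        simp [pvRuns, h, hc]

theorem pvA_runs (xs : List (List Int)) :
    pvProc [] xs = ((pvRuns xs).map pvSel).flatten := by
  rw [pvPA xs []]
  cases h : pvRuns xs with
  | nil => simp
  | cons r rs => simp

-- ---- runs facts ----

theorem pvRuns_flatten : ∀ ys : List (List Int), (pvRuns ys).flatten = ys := by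
  intro ys
  induction ys with
  | nil => simp [pvRuns]
  | cons c ys ih =>
    cases ys with
    | nil => simp [pvRuns]
    | cons d t =>
      rcases pvRuns_shape t d with ⟨s, ss, h⟩
      rw [h] at ih
      cases hc : pvCh c d <;> simp_all [pvRuns]

theorem pvRuns_ne_nil : ∀ (ys : List (List Int)) (r : List (List Int)), r ∈ pvRuns ys → r ≠ [] := by
  intro ys
  induction ys with
  | nil => simp [pvRuns]
  | cons c ys ih =>
    cases ys with
    | nil => simp [pvRuns]
    | cons d t =>
      rcases pvRuns_shape t d with ⟨s, ss, h⟩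
      intro r hr
      rw [pvRuns, h] at hr
      cases hc : pvCh c d <;> rw [hc] at hr <;>
        simp only [Bool.false_eq_true, reduceIte, List.mem_cons] at hr
      · rcases hr with rfl | rfl | hr
        · simp
        · exact ih _ (by rw [h]; simp)
        · exact ih r (by rw [h]; exact List.mem_cons_of_mem _ hr)
      · rcases hr with rfl | hr
        · simp
        · exact ih r (by rw [h]; exact List.mem_cons_of_mem _ hr)

theorem pvRuns_chain : ∀ (ys : List (List Int)) (r : List (List Int)), r ∈ pvRuns ys →
    List.IsChain (fun a b => pvCh a b = true) r := by
  intro ys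
  induction ys with
  | nil => simp [pvRuns]
  | cons c ys ih =>
    cases ys with
    | nil =>
      intro r hr
      simp [pvRuns] at hr
      simp [hr]
    | cons d t =>
      rcases pvRuns_shape t d with ⟨s, ss, h⟩
      intro r hr
      rw [pvRuns, h] at hr
      cases hc : pvCh c d <;> rw [hc] at hr <;>
        simp only [Bool.false_eq_true, reduceIte, List.mem_cons] at hr
      · rcases hr with rfl | rfl | hr
        · simp
        · exact ih _ (by rw [h]; simp)
        · exact ih r (by rw [h]; exact List.mem_cons_of_mem _ hr)
      · rcases hr with rfl | hr
        · exact List.isChain_cons_cons.mpr ⟨hc, ih (d :: s) (by rw [h]; simp)⟩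
        · exact ih r (by rw [h]; exact List.mem_cons_of_mem _ hr)

theorem pvRuns_bnd : ∀ ys : List (List Int), List.IsChain pvBnd (pvRuns ys) := by
  intro ys
  induction ys with
  | nil => simp [pvRuns]
  | cons c ys ih =>
    cases ys with
    | nil => simp [pvRuns]
    | cons d t =>
      rcases pvRuns_shape t d with ⟨s, ss, h⟩
      rw [h] at ih
      rw [pvRuns, h]
      cases hc : pvCh c d <;> simp only [Bool.false_eq_true, reduceIte]
      · refine List.isChain_cons_cons.mpr ⟨?_, ih⟩
        intro a b ha hb
        simp at ha hb
        subst ha; subst hb; exact hc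
      · cases ss with
        | nil => simp
        | cons r' ss' =>
          have hpair : pvBnd (d :: s) r' := (List.isChain_cons_cons.mp ih).1
          have htail : List.IsChain pvBnd (r' :: ss') := (List.isChain_cons_cons.mp ih).2
          refine List.isChain_cons_cons.mpr ⟨?_, htail⟩
          intro a b ha hb
          exact hpair a b (by rw [← List.getLast?_cons_cons]; exact ha) hb

-- ---- B side ----

theorem pvB1 (xs : List (List Int)) :
    ∀ (i : Nat), i ≤ xs.length → ∀ (k : Bool) (out : List (List Int)),
      fclcAltGo xs i k out = out ++ pvHrev ((xs.take i).reverse) k := by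
  intro i
  induction i with
  | zero => intro _ k out; simp [fclcAltGo, pvHrev]
  | succ i ih =>
    intro h k out
    have hi : i < xs.length := h
    have hcur : PySem.List.pyGetD xs (i : Int) [] = xs[i] :=
      PySem.List.pyGetD_ofNat xs i [] hi
    have htake : (xs.take (i+1)).reverse = xs[i] :: (xs.take i).reverse := by
      rw [List.take_add_one]
      simp [List.getElem?_eq_getElem hi]
    have hstep : fclcAltGo xs (i+1) k out = fclcAltGo xs i
        (if decide (0 < i) && (PySem.List.pyGetD (PySem.List.pyGetD xs ((i : Int) - 1) []) 1 0 ==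
            PySem.List.pyGetD (PySem.List.pyGetD xs (i : Int) []) 0 0) then !k else true)
        (if k then out ++ [PySem.List.pyGetD xs (i : Int) []] else out) := rfl
    have hrev1 : pvHrev (xs[i] :: (xs.take i).reverse) k =
        (if k then [xs[i]] else []) ++ pvHrev ((xs.take i).reverse)
          (match (xs.take i).reverse with
           | [] => true
           | d :: _ => if pvCh d xs[i] then !k else true) := rfl
    have hout : (if k then out ++ [PySem.List.pyGetD xs (i : Int) []] else out) =
        out ++ (if k then [xs[i]] else []) := by
      cases k <;> simp [hcur]
    have hkeep : (if decide (0 < i) && (PySem.List.pyGetD (PySem.List.pyGetD xs ((i : Int) - 1) []) 1 0 ==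
            PySem.List.pyGetD (PySem.List.pyGetD xs (i : Int) []) 0 0) then !k else true) =
        (match (xs.take i).reverse with
         | [] => true
         | d :: _ => if pvCh d xs[i] then !k else true) := by
      cases i with
      | zero => simp
      | succ j =>
        have hj : j < xs.length := by omega
        have htj : (xs.take (j+1)).reverse = xs[j] :: (xs.take j).reverse := by
          rw [List.take_add_one]
          simp [List.getElem?_eq_getElem hj]
        rw [htj]
        have hj1 : ((j + 1 : Nat) : Int) - 1 = (j : Int) := by push_cast; ring
        rw [hj1, PySem.List.pyGetD_ofNat xs j [] hj, hcur]
        simp [pvCh]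
    rw [hstep, ih (le_of_lt hi), hout, hkeep, htake, hrev1, List.append_assoc]

theorem pvB_eq (xs : List (List Int)) :
    filter_character_literal_candidates_alt xs = (pvHrev xs.reverse true).reverse := by
  unfold filter_character_literal_candidates_alt
  rw [pvB1 xs xs.length le_rfl true []]
  simp

theorem pvHsplit : ∀ (w q : List (List Int)) (k : Bool),
    w ≠ [] →
    List.IsChain (fun c d => pvCh d c = true) w →
    (∀ a b, w.getLast? = some a → q.head? = some b → pvCh b a = false) →
    pvHrev (w ++ q) k = pvAlt2 w k ++ pvHrev q true := by
  intro w
  induction w with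
  | nil => intro q k h; exact absurd rfl h
  | cons c w' ih =>
    intro q k _ hchain hbnd
    cases w' with
    | nil =>
      cases q with
      | nil => simp [pvHrev, pvAlt2]
      | cons d q' =>
        have hK : pvCh d c = false := hbnd c d rfl rfl
        have hstep : pvHrev ([c] ++ d :: q') k =
            (if k then [c] else []) ++ pvHrev (d :: q') (if pvCh d c then !k else true) := rfl
        rw [hstep, hK]
        simp [pvAlt2]
    | cons c' w'' =>
      have hcc : pvCh c' c = true := (List.isChain_cons_cons.mp hchain).1
      have hstep : pvHrev ((c :: c' :: w'') ++ q) k =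
          (if k then [c] else []) ++ pvHrev ((c' :: w'') ++ q)
            (if pvCh c' c then !k else true) := rfl
      rw [hstep, hcc, if_pos rfl]
      rw [ih q (!k) (by simp) (List.isChain_cons_cons.mp hchain).2
        (fun a b ha hb => hbnd a b (by rw [List.getLast?_cons_cons]; exact ha) hb)]
      simp [pvAlt2]

theorem pvFlatten_getLast? : ∀ (L : List (List (List Int))), (∀ r ∈ L, r ≠ []) →
    L.flatten.getLast? = L.getLast?.bind List.getLast? := by
  intro L hne
  cases L using List.reverseRecOn with
  | nil => simp
  | append_singleton L r =>
    have hr : r ≠ [] := hne r (by simp)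
    rw [List.flatten_append]
    simp [List.getLast?_append_of_ne_nil _ hr]

theorem pvHBgen : ∀ (L : List (List (List Int))),
    (∀ r ∈ L, r ≠ []) →
    (∀ r ∈ L, List.IsChain (fun a b => pvCh a b = true) r) →
    List.IsChain pvBnd L →
    pvHrev L.flatten.reverse true =
      ((L.map (fun r => pvAlt2 r.reverse true)).reverse).flatten := by
  intro L
  induction L using List.reverseRecOn with
  | nil => intro _ _ _; simp [pvHrev]
  | append_singleton L r ih =>
    intro hne hch hbnd
    have hr : r ≠ [] := hne r (by simp)
    have hbndL := List.isChain_append.mp hbnd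
    have hflat : (L ++ [r]).flatten.reverse = r.reverse ++ L.flatten.reverse := by
      simp [List.flatten_append]
    rw [hflat]
    rw [pvHsplit r.reverse (L.flatten.reverse) true (by simp [hr])
      (List.isChain_reverse.mpr (hch r (by simp)))
      ?_]
    · rw [ih (fun r' h' => hne r' (by simp [h']))
        (fun r' h' => hch r' (by simp [h'])) hbndL.1]
      simp
    · intro a b ha hb
      rw [List.getLast?_reverse] at ha
      rw [List.head?_reverse] at hb
      rw [pvFlatten_getLast? L (fun r' h' => hne r' (by simp [h']))] at hb
      rcases hLl : L.getLast? with _ | rL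
      · rw [hLl] at hb; simp at hb
      · rw [hLl] at hb
        simp only [Option.bind_some] at hb
        have hpair : pvBnd rL r := hbndL.2.2 rL (by simp [hLl]) r (by simp)
        exact hpair b a hb ha

theorem pvB_runs (xs : List (List Int)) :
    filter_character_literal_candidates_alt xs =
      ((pvRuns xs).map (fun r => (pvAlt2 r.reverse true).reverse)).flatten := by
  rw [pvB_eq]
  have h := pvHBgen (pvRuns xs) (pvRuns_ne_nil xs) (pvRuns_chain xs) (pvRuns_bnd xs)
  rw [pvRuns_flatten] at h
  rw [h, List.reverse_flatten]
  simp [List.map_reverse, List.map_map, Function.comp_def]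

-- ---- per-run selection bridge ----

theorem pvAlt2_true_eq_eo : ∀ s : List (List Int), pvAlt2 s true = pvEo s := by
  intro s
  induction s using pvEo.induct with
  | case1 => simp [pvAlt2, pvEo]
  | case2 a => simp [pvAlt2, pvEo]
  | case3 a b t ih => simp [pvAlt2, pvEo, ih]

theorem pvEo_append_two : ∀ (q : List (List Int)) (b a : List Int),
    pvEo (q ++ [b, a]) = pvEo q ++ [if q.length % 2 == 0 then b else a] := by
  intro q
  induction q using pvEo.induct with
  | case1 => intro b a; simp [pvEo]
  | case2 x => intro b a; simp [pvEo]
  | case3 x y q ih =>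
    intro b a
    simp only [List.cons_append, pvEo, ih, List.length_cons]
    have : (q.length + 1 + 1) % 2 = q.length % 2 := by omega
    simp [this]

theorem pvSel_step : ∀ (t : List (List Int)) (a b : List Int),
    pvSel (a :: b :: t) = (if t.length % 2 == 0 then b else a) :: pvSel t := by
  intro t a b
  unfold pvSel
  have hm1 : PySem.Int.mod (((a :: b :: t).length : Int) + 1) 2 =
      (((t.length + 3) % 2 : Nat) : Int) := by
    have hcast : (((a :: b :: t).length : Int) + 1) = ((t.length + 3 : Nat) : Int) := by
      simp; ring
    rw [hcast]
    simp
  have hm2 : PySem.Int.mod ((t.length : Int) + 1) 2 = (((t.length + 1) % 2 : Nat) : Int) := by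
    have hcast : ((t.length : Int) + 1) = ((t.length + 1 : Nat) : Int) := by push_cast; ring
    rw [hcast]
    simp
  have hp3 : (t.length + 3) % 2 = (t.length + 1) % 2 := by omega
  rw [hm1, hm2, hp3]
  set n := t.length with hn
  set p := (n + 1) % 2 with hp
  have hlen2 : ((a :: b :: t).length : Int) = ((n + 2 : Nat) : Int) := by
    simp [← hn]; ring
  rw [hlen2]
  have h2 : (0 : Int) < 2 := by norm_num
  rw [PySem.List.pyRange_of_pos _ _ h2, PySem.List.pyRange_of_pos _ _ h2]
  have hc1 : (if ((p : Nat) : Int) < ((n + 2 : Nat) : Int) then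
        ((((n + 2 : Nat) : Int) - ((p : Nat) : Int) + 2 - 1) / 2).toNat else 0) =
      (if ((p : Nat) : Int) < ((n : Nat) : Int) then
        ((((n : Nat) : Int) - ((p : Nat) : Int) + 2 - 1) / 2).toNat else 0) + 1 := by
    have hple : p ≤ 1 := by omega
    have hpv : p = (n + 1) % 2 := hp
    split_ifs with h1 h2' <;> push_cast at * <;> omega
  rw [hc1, List.range_succ_eq_map]
  simp only [List.map_cons, List.map_map, Nat.cast_zero, mul_zero, add_zero]
  have hhead : PySem.List.pyGetD (a :: b :: t) ((p : Nat) : Int) [] =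
      (if n % 2 == 0 then b else a) := by
    rcases (by omega : p = 0 ∨ p = 1) with hp0 | hp1
    · have hn2 : n % 2 = 1 := by omega
      rw [hp0]
      simp [hn2, PySem.List.pyGetD_ofNat']
    · have hn2 : n % 2 = 0 := by omega
      rw [hp1]
      simp [hn2, PySem.List.pyGetD_ofNat']
  have htail : ∀ k ∈ List.range (if ((p : Nat) : Int) < ((n : Nat) : Int) then
        ((((n : Nat) : Int) - ((p : Nat) : Int) + 2 - 1) / 2).toNat else 0),
      PySem.List.pyGetD (a :: b :: t) (((p : Nat) : Int) + 2 * ((Nat.succ k : Nat) : Int)) [] =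
        PySem.List.pyGetD t (((p : Nat) : Int) + 2 * ((k : Nat) : Int)) [] := by
    intro k _
    have hcast : (((p : Nat) : Int) + 2 * ((Nat.succ k : Nat) : Int)) =
        ((p + 2 * k + 2 : Nat) : Int) := by push_cast; ring
    have hcast2 : (((p : Nat) : Int) + 2 * ((k : Nat) : Int)) = ((p + 2 * k : Nat) : Int) := by
      push_cast; ring
    rw [hcast, hcast2, PySem.List.pyGetD_natCast, PySem.List.pyGetD_natCast]
    show List.getD (a :: b :: t) (p + 2 * k + 2) [] = List.getD t (p + 2 * k) []
    rfl
  rw [hhead]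
  congr 1
  exact List.map_congr_left htail

theorem pvSEL : ∀ r : List (List Int), pvSel r = (pvAlt2 r.reverse true).reverse := by
  intro r
  induction r using pvEo.induct with
  | case1 =>
    simp [pvSel, PySem.List.pyRange_of_pos _ _ (by norm_num : (0 : Int) < 2), pvAlt2]
  | case2 a =>
    simp [pvSel, PySem.List.pyRange_of_pos _ _ (by norm_num : (0 : Int) < 2), pvAlt2]
    try rfl
  | case3 a b t ih =>
    rw [pvSel_step]
    have hrev : (a :: b :: t).reverse = t.reverse ++ [b, a] := by simp
    rw [hrev, pvAlt2_true_eq_eo, pvEo_append_two]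
    rw [pvAlt2_true_eq_eo] at ih
    simp [ih]

-- ===== VERDICT (by name: the statement is the Claim_ definition above) =====
theorem filter_character_literal_candidates_spec : Claim_equal_filter_character_literal_candidates := by
  intro xs _ _
  unfold Spec_filter_character_literal_candidates
  rw [pvA_eq, pvA_runs, pvB_runs]
  exact congrArg List.flatten (List.map_congr_left (fun r _ => pvSEL r))
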